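-- pv_equiv track=rewrite | github.com/FedeSchmidt/Argument-Extraction-using-STS | nbs/utils.py | get_arguments_indices
-- ===== SOURCE A (Python) =====
-- def get_arguments_indices(sequence):
--     indices = []
--     start_index = None
--     for i, label in enumerate(sequence):
--         if label == '1':
--
--             if start_index is None:
--                 start_index = i
--             else:
--                 indices.append((start_index, i))
--                 start_index = i
--
--         elif (label == '0') and (start_index is not None):
--             indices.append((start_index, i))
--             start_index = None
--
--     if start_index is not None:
--         indices.append((start_index, len(sequence)))
--
--     return indices
-- ===== SOURCE B (Python) =====
-- def get_arguments_indices(sequence):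
--     # One pass to collect the '0'/'1' marker positions, then a back-to-front pass
--     # pairing each '1' marker with the next marker's index (or the end of the sequence).
--     markers = [(i, label == '1') for i, label in enumerate(sequence) if label in ('0', '1')]
--     nxt = len(sequence)
--     spans = []
--     for i, is_one in reversed(markers):
--         if is_one:
--             spans.append((i, nxt))
--         nxt = i
--     spans.reverse()
--     return spans
-- ===== Notes on version B (the rewrite author's own statement) =====
-- stated objective: alternative
-- what changed: Replaces A's stateful scan (an open start_index mutated across iterations) by a two-phase decomposition: one comprehension collects the '0'/'1' marker positions, then a back-to-front pass pairs each '1' marker with the next marker's index (or len(sequence)) and the result is reversed.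
import Mathlib
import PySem

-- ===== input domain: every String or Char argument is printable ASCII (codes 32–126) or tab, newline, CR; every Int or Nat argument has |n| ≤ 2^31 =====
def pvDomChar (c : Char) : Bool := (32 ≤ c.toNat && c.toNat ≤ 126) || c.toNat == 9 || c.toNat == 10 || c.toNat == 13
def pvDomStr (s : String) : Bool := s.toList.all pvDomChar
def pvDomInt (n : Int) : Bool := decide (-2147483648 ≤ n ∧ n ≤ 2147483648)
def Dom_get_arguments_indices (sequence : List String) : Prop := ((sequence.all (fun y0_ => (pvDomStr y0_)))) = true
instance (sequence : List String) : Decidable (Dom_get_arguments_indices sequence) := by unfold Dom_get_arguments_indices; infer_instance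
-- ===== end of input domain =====

-- ===== PORT A =====
-- A: single scan with an open start_index; settles the open span at the end.
def goA : List String → Int → Option Int → List (Int × Int) → List (Int × Int)
  | [], i, start, acc =>
      match start with
      | none => acc
      | some s => acc ++ [(s, i)]
  | label :: rest, i, start, acc =>
      if label = "1" then
        match start with
        | none => goA rest (i + 1) (some i) acc
        | some s => goA rest (i + 1) (some i) (acc ++ [(s, i)])
      else if label = "0" then
        match start with
        | none => goA rest (i + 1) none acc
        | some s => goA rest (i + 1) none (acc ++ [(s, i)])
      else goA rest (i + 1) start acc

def get_arguments_indices (sequence : List String) : List (Int × Int) :=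
  goA sequence 0 none []

-- ===== PORT B =====
-- B: back-to-front pass over the reversed markers, tracking the next marker index.
def revGo : List (Int × Bool) → Int → List (Int × Int) → List (Int × Int)
  | [], _, spans => spans
  | (i, isOne) :: rest, nxt, spans =>
      revGo rest i (if isOne then spans ++ [(i, nxt)] else spans)

def get_arguments_indices_alt (sequence : List String) : List (Int × Int) :=
  let markers := (PySem.List.enumerate sequence 0).filterMap
    (fun p => if p.2 = "0" ∨ p.2 = "1" then some (p.1, p.2 == "1") else none)
  (revGo markers.reverse sequence.length []).reverse

-- ===== PRECONDITION & SPEC =====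
def Spec_get_arguments_indices (sequence : List String) (out : List (Int × Int)) : Prop := out = get_arguments_indices_alt sequence
instance (sequence : List String) (out : List (Int × Int)) : Decidable (Spec_get_arguments_indices sequence out) := by unfold Spec_get_arguments_indices; infer_instance

-- ===== CLAIM (what is proved, stated in full; the proofs are below) =====
def Claim_equal_get_arguments_indices : Prop := ∀ (sequence : List String), Dom_get_arguments_indices sequence → Spec_get_arguments_indices sequence (get_arguments_indices sequence)

-- ===== LEMMAS AND PROOFS =====

-- proof-only helper: one forward pass pairing each '1' marker with the next marker (or n)
def spansB (n : Int) : List (Int × Bool) → List (Int × Int)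
  | [] => []
  | (i, isOne) :: rest =>
      let tail := spansB n rest
      if isOne then
        (i, match rest with | [] => n | (j, _) :: _ => j) :: tail
      else tail

-- proof-only helper: the markers of the suffix starting at absolute index i
def markersFrom (i : Int) : List String → List (Int × Bool)
  | [] => []
  | lab :: rest =>
      if lab = "0" ∨ lab = "1" then (i, lab == "1") :: markersFrom (i + 1) rest
      else markersFrom (i + 1) rest

def firstIdx (d : Int) : List (Int × Bool) → Int
  | [] => d
  | (j, _) :: _ => j

theorem markersFrom_eq (xs : List String) : ∀ (i : Int),
    (PySem.List.enumerate xs i).filterMap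
      (fun p => if p.2 = "0" ∨ p.2 = "1" then some (p.1, p.2 == "1") else none)
    = markersFrom i xs := by
  induction xs with
  | nil => intro i; simp [PySem.List.enumerate_nil, markersFrom]
  | cons x xs ih =>
      intro i
      simp only [PySem.List.enumerate_cons, List.filterMap_cons, markersFrom]
      by_cases h : x = "0" ∨ x = "1" <;> simp [h, ih]

theorem spansB_cons (n i : Int) (b : Bool) (rest : List (Int × Bool)) :
    spansB n ((i, b) :: rest) =
      if b then (i, firstIdx n rest) :: spansB n rest else spansB n rest := by
  cases rest with
  | nil => cases b <;> rfl
  | cons p t => cases p; cases b <;> rfl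

theorem spansB_append_single (i : Int) (b : Bool) (xs : List (Int × Bool)) : ∀ (d : Int),
    spansB d (xs ++ [(i, b)]) = spansB i xs ++ (if b then [(i, d)] else []) := by
  induction xs with
  | nil => intro d; cases b <;> rfl
  | cons p xs ih =>
      intro d
      obtain ⟨j, c⟩ := p
      rw [List.cons_append, spansB_cons, spansB_cons, ih d]
      cases hx : xs with
      | nil => cases b <;> cases c <;> simp [firstIdx, spansB]
      | cons q t => cases c <;> simp [firstIdx]

theorem revGo_eq (ks : List (Int × Bool)) : ∀ (nxt : Int) (spans : List (Int × Int)),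
    revGo ks nxt spans = spans ++ (spansB nxt ks.reverse).reverse := by
  induction ks with
  | nil => intro nxt spans; simp [revGo, spansB]
  | cons p rest ih =>
      intro nxt spans
      obtain ⟨i, b⟩ := p
      rw [revGo, ih, List.reverse_cons, spansB_append_single]
      cases b <;> simp

theorem alt_eq_spansB (sequence : List String) :
    get_arguments_indices_alt sequence =
      spansB sequence.length
        ((PySem.List.enumerate sequence 0).filterMap
          (fun p => if p.2 = "0" ∨ p.2 = "1" then some (p.1, p.2 == "1") else none)) := by
  simp only [get_arguments_indices_alt, revGo_eq]
  simp

theorem goA_eq (rest : List String) : ∀ (i : Int) (acc : List (Int × Int)) (start : Option Int),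
    goA rest i start acc = acc ++
      (match start with
       | none => spansB (i + rest.length) (markersFrom i rest)
       | some s => (s, firstIdx (i + rest.length) (markersFrom i rest)) ::
                    spansB (i + rest.length) (markersFrom i rest)) := by
  induction rest with
  | nil =>
      intro i acc start
      cases start <;> simp [goA, markersFrom, spansB, firstIdx]
  | cons lab rest ih =>
      intro i acc start
      have hn : i + ((lab :: rest).length : Int) = (i + 1) + rest.length := by
        simp; ring
      by_cases h1 : lab = "1"
      · subst h1
        cases start with
        | none =>
            simp only [goA, ih, markersFrom, firstIdx, hn]
            simp [spansB_cons, firstIdx]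
        | some s =>
            simp only [goA, ih, markersFrom, firstIdx, hn]
            simp [spansB_cons, firstIdx]
      · by_cases h0 : lab = "0"
        · subst h0
          cases start with
          | none =>
              simp only [goA, ih, markersFrom, firstIdx, hn]
              simp [spansB_cons]
          | some s =>
              simp only [goA, ih, markersFrom, firstIdx, hn]
              simp [spansB_cons]
        · have hm : markersFrom i (lab :: rest) = markersFrom (i + 1) rest := by
            simp [markersFrom, h0, h1]
          cases start with
          | none => simp only [goA, if_neg h1, if_neg h0, ih, hm, hn]
          | some s => simp only [goA, if_neg h1, if_neg h0, ih, hm, hn]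

-- ===== VERDICT (by name: the statement is the Claim_ definition above) =====
theorem get_arguments_indices_spec : Claim_equal_get_arguments_indices := by
  intro sequence _
  unfold Spec_get_arguments_indices get_arguments_indices
  rw [alt_eq_spansB, goA_eq, markersFrom_eq]
  simp
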